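-- pv_equiv track=rewrite | github.com/clintonkoltz/Halo5_Stats | halo5/team_check.py | team_check
-- ===== SOURCE A (Python) =====
-- def team_check(match_players):
--
--     team1 = 'None'
--     team2 = 'None'
--
--     Teams = {
--
--         'clg' : [
--                 'CLG Royal 2',
--                 'CLG Frosty HCS',
--                 'CLG Snake Bite',
--                 'CLG LethuL HCS' ],
--         'clgr': [
--                 'CLG Frosty HCS',
--                 'CLG Snake Bite',
--                 'Rammyy',
--                 'CLG LethuL HCS' ],
--         'e6'  : [
--                 'E6 Huke HCS',
--                 'HukE6',
--                 'E6 Shooter',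
--                 'E6 Cratos HCS',
--                 'bubu dubu',
--                 'E6 bubu dubu' ],
--         'nv'  : [
--                 'nV Mikwen HCS',
--                 'nV eL ToWn',
--                 'nV RayneHCS',
--                 'Rayne nV',
--                 'nV Pistola HCS' ],
--         'rng' : [
--                 'RNG Penguin HCS',
--                 'Peng',
--                 'RNG Victory X',
--                 'RNG Ninja HCS',
--                 'HAMY',
--                 'RNG Commonly' ],
--         'alg' : [
--                 'ALG RyaNoob',
--                 'ALG Heinz HCS',
--                 'ALGPredevonator',
--                 'ALG Goofy HCS',
--                 'ALG ContrA HCS'],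
--         'algr': [
--                 'ALG Heinz HCS',
--                 'ALGPredevonator',
--                 'Rammyy',
--                 'ALG ContrA HCS'],
--         'eg'  : [
--                 'EG SuspectorHCS',
--                 'EG Snip3downHCS',
--                 'EG Lunchbox HCS',
--                 'EG Roy HCS' ],
--         'op'  : [
--                 'OG ACE HCS',
--                 'OG Str8 SickHCS',
--                 'OG Maniac HCS',
--                 'aPG',
--                 'OG APG HCS' ],
--         'tl'  : [
--                 'TL Eco HCS',
--                 'Liquid Eco',
--                 'TL StelluR',
--                 'SStelluR',
--                 'TL Spartan HCS',
--                 'Danoxide HCS',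
--                 'TL Assault HCS',
--                 'TL Danoxide' ]
--         }
--
--
--     for i in Teams.keys():
--         if ( len( set(Teams[i]).intersection(match_players) ) == 4 ):
--             if ( team1 == 'None' ):
--                 team1 = i
--             else:
--                 team2 = i
--
--     return [team1, team2]
-- ===== SOURCE B (Python) =====
-- def team_check(match_players):
--
--     Teams = {
--
--         'clg' : [
--                 'CLG Royal 2',
--                 'CLG Frosty HCS',
--                 'CLG Snake Bite',
--                 'CLG LethuL HCS' ],
--         'clgr': [
--                 'CLG Frosty HCS',
--                 'CLG Snake Bite',
--                 'Rammyy',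
--                 'CLG LethuL HCS' ],
--         'e6'  : [
--                 'E6 Huke HCS',
--                 'HukE6',
--                 'E6 Shooter',
--                 'E6 Cratos HCS',
--                 'bubu dubu',
--                 'E6 bubu dubu' ],
--         'nv'  : [
--                 'nV Mikwen HCS',
--                 'nV eL ToWn',
--                 'nV RayneHCS',
--                 'Rayne nV',
--                 'nV Pistola HCS' ],
--         'rng' : [
--                 'RNG Penguin HCS',
--                 'Peng',
--                 'RNG Victory X',
--                 'RNG Ninja HCS',
--                 'HAMY',
--                 'RNG Commonly' ],
--         'alg' : [
--                 'ALG RyaNoob',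
--                 'ALG Heinz HCS',
--                 'ALGPredevonator',
--                 'ALG Goofy HCS',
--                 'ALG ContrA HCS'],
--         'algr': [
--                 'ALG Heinz HCS',
--                 'ALGPredevonator',
--                 'Rammyy',
--                 'ALG ContrA HCS'],
--         'eg'  : [
--                 'EG SuspectorHCS',
--                 'EG Snip3downHCS',
--                 'EG Lunchbox HCS',
--                 'EG Roy HCS' ],
--         'op'  : [
--                 'OG ACE HCS',
--                 'OG Str8 SickHCS',
--                 'OG Maniac HCS',
--                 'aPG',
--                 'OG APG HCS' ],
--         'tl'  : [
--                 'TL Eco HCS',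
--                 'Liquid Eco',
--                 'TL StelluR',
--                 'SStelluR',
--                 'TL Spartan HCS',
--                 'Danoxide HCS',
--                 'TL Assault HCS',
--                 'TL Danoxide' ]
--         }
--
--     # inverted index: player name -> list of team keys whose roster contains it
--     index = {}
--     for k, roster in Teams.items():
--         for p in roster:
--             index.setdefault(p, []).append(k)
--
--     # one pass over the distinct match players, bumping a counter per team
--     counts = {}
--     for p in set(match_players):
--         for k in index.get(p, []):
--             counts[k] = counts.get(k, 0) + 1
--
--     team1 = 'None'
--     team2 = 'None'
--     for k in Teams:
--         if counts.get(k, 0) == 4: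
--             if team1 == 'None':
--                 team1 = k
--             else:
--                 team2 = k
--
--     return [team1, team2]
-- ===== Notes on version B (the rewrite author's own statement) =====
-- stated objective: alternative
-- what changed: Instead of intersecting each team's roster-set with the match list (one pass over match_players per team), B builds an inverted index from player name to the team keys containing it, makes a single counting pass over the distinct match players, and then reads off the teams whose counter is exactly 4 in table order.
import Mathlib
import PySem

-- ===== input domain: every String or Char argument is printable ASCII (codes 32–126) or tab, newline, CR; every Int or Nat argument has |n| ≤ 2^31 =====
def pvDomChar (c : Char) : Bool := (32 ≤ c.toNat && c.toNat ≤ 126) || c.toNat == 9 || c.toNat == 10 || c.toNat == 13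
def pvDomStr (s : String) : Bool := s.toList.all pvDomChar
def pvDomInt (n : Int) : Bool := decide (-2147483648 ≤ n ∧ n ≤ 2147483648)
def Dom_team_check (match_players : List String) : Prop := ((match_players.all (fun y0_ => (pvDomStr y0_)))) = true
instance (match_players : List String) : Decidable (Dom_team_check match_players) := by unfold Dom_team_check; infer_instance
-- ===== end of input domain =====

-- B replaces A's per-team set intersections by one inverted index (player -> team keys) and a single
-- counting pass over the distinct match players; objective: alternative decomposition.

-- The fixed Teams table (shared data of both ports, item order = the Python dict's insertion order)
def TeamsTable : List (String × List String) :=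
  [ ("clg",  ["CLG Royal 2", "CLG Frosty HCS", "CLG Snake Bite", "CLG LethuL HCS"]),
    ("clgr", ["CLG Frosty HCS", "CLG Snake Bite", "Rammyy", "CLG LethuL HCS"]),
    ("e6",   ["E6 Huke HCS", "HukE6", "E6 Shooter", "E6 Cratos HCS", "bubu dubu", "E6 bubu dubu"]),
    ("nv",   ["nV Mikwen HCS", "nV eL ToWn", "nV RayneHCS", "Rayne nV", "nV Pistola HCS"]),
    ("rng",  ["RNG Penguin HCS", "Peng", "RNG Victory X", "RNG Ninja HCS", "HAMY", "RNG Commonly"]),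
    ("alg",  ["ALG RyaNoob", "ALG Heinz HCS", "ALGPredevonator", "ALG Goofy HCS", "ALG ContrA HCS"]),
    ("algr", ["ALG Heinz HCS", "ALGPredevonator", "Rammyy", "ALG ContrA HCS"]),
    ("eg",   ["EG SuspectorHCS", "EG Snip3downHCS", "EG Lunchbox HCS", "EG Roy HCS"]),
    ("op",   ["OG ACE HCS", "OG Str8 SickHCS", "OG Maniac HCS", "aPG", "OG APG HCS"]),
    ("tl",   ["TL Eco HCS", "Liquid Eco", "TL StelluR", "SStelluR", "TL Spartan HCS",
              "Danoxide HCS", "TL Assault HCS", "TL Danoxide"]) ]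

-- ===== PORT A =====
-- Teams[i] with i drawn from Teams.keys() never raises: getD is exact here.
def team_check (match_players : List String) : List String :=
  let team1 := "None"
  let team2 := "None"
  let Teams : PySem.Dict String (List String) := PySem.Dict.ofList TeamsTable
  let res := Teams.keys.foldl (fun (st : String × String) i =>
      if PySem.Set.len (PySem.Set.inter (PySem.Set.ofList (Teams.getD i [])) match_players) = 4 then
        (if st.1 = "None" then (i, st.2) else (st.1, i))
      else st) (team1, team2)
  [res.1, res.2]

-- ===== PORT B =====
-- index.setdefault(p, []).append(k)  ==  index[p] = index.get(p, []) + [k]  ==  Dict.modify p [] (· ++ [k])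
def team_check_alt (match_players : List String) : List String :=
  let index : PySem.Dict String (List String) :=
    TeamsTable.foldl (fun d kr => kr.2.foldl (fun d p => d.modify p [] (fun v => v ++ [kr.1])) d)
      PySem.Dict.empty
  let counts : PySem.Dict String Int :=
    (PySem.Set.ofList match_players).foldl
      (fun c p => (index.getD p []).foldl (fun c k => c.insert k (c.getD k 0 + 1)) c)
      PySem.Dict.empty
  let res := (TeamsTable.map (fun kr => kr.1)).foldl (fun (st : String × String) k =>
      if counts.getD k 0 = 4 then
        (if st.1 = "None" then (k, st.2) else (st.1, k))
      else st) ("None", "None")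
  [res.1, res.2]

-- ===== PRECONDITION & SPEC =====
def Spec_team_check (match_players : List String) (out : List String) : Prop := out = team_check_alt match_players
instance (match_players : List String) (out : List String) : Decidable (Spec_team_check match_players out) := by unfold Spec_team_check; infer_instance

-- ===== CLAIM (what is proved, stated in full; the proofs are below) =====
def Claim_equal_team_check : Prop := ∀ (match_players : List String), Dom_team_check match_players → Spec_team_check match_players (team_check match_players)

-- ===== LEMMAS AND PROOFS =====

-- Proof-side names for the closed constants inside the ports
def pvIdx : PySem.Dict String (List String) :=
  TeamsTable.foldl (fun d kr => kr.2.foldl (fun d p => d.modify p [] (fun v => v ++ [kr.1])) d)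
    PySem.Dict.empty

def pvCounts (match_players : List String) : PySem.Dict String Int :=
  (PySem.Set.ofList match_players).foldl
    (fun c p => (pvIdx.getD p []).foldl (fun c k => c.insert k (c.getD k 0 + 1)) c)
    PySem.Dict.empty

def pvPairs : List (String × String) := TeamsTable.flatMap (fun kr => kr.2.map (fun p => (p, kr.1)))

-- the nested index-building loop is the flat loop over the (player, key) pairs
set_option maxRecDepth 100000 in
lemma pvIdx_flat : pvIdx = pvPairs.foldl (fun d q => d.modify q.1 [] (fun v => v ++ [q.2])) PySem.Dict.empty := rfl

-- how often team key kr.1 occurs in the index entry of a player p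
set_option maxRecDepth 100000 in
lemma pvIdx_count : ∀ kr ∈ TeamsTable, ∀ p : String, (pvIdx.getD p []).count kr.1 = kr.2.count p := by
  intro kr hkr p
  rw [pvIdx_flat, PySem.Dict.getD_foldl_modify_append]
  fin_cases hkr <;>
    simp [pvPairs, TeamsTable, List.count, List.countP_map, List.countP_filter, List.countP_cons]

-- the counting loop accumulates, per key, the counts of the index entries
lemma pvCounts_fold (idx : PySem.Dict String (List String)) : ∀ (L : List String) (c : PySem.Dict String Int) (k : String),
    (L.foldl (fun c p => (idx.getD p []).foldl (fun c k' => c.insert k' (c.getD k' 0 + 1)) c) c).getD k 0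
    = c.getD k 0 + ((L.map (fun p => ((idx.getD p []).count k : Int))).sum) := by
  intro L
  induction L with
  | nil => simp
  | cons x xs ih =>
    intro c k
    simp [ih, PySem.Dict.getD_foldl_insert_add_one]
    ring

lemma pvRosters_nodup : ∀ kr ∈ TeamsTable, kr.2.Nodup := by decide

-- B's counter of a team = number of distinct match players on its roster
set_option maxRecDepth 100000 in
lemma pvCounts_getD (match_players : List String) (kr : String × List String) (hkr : kr ∈ TeamsTable) :
    (pvCounts match_players).getD kr.1 0
    = ((PySem.Set.ofList match_players).countP (fun p => decide (p ∈ kr.2)) : Int) := by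
  rw [pvCounts, pvCounts_fold pvIdx]
  have hnd := pvRosters_nodup kr hkr
  have h1 : ∀ p : String, ((pvIdx.getD p []).count kr.1 : Int) = if decide (p ∈ kr.2) = true then (1:Int) else 0 := by
    intro p
    rw [pvIdx_count kr hkr p]
    by_cases hm : p ∈ kr.2
    · simp [hm, List.count_eq_one_of_mem hnd hm]
    · simp [hm, List.count_eq_zero_of_not_mem hm]
  simp only [h1]
  rw [PySem.List.sum_map_ite_one_zero]
  simp

-- A's set intersection size = the same number
lemma pvInter_len (match_players : List String) (kr : String × List String) (hkr : kr ∈ TeamsTable) :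
    PySem.Set.len (PySem.Set.inter (PySem.Set.ofList kr.2) match_players)
    = ((PySem.Set.ofList match_players).countP (fun p => decide (p ∈ kr.2)) : Int) := by
  have hnd := pvRosters_nodup kr hkr
  have hr : PySem.Set.ofList kr.2 = kr.2 := PySem.Set.ofList_eq_self_of_nodup kr.2 hnd
  rw [PySem.Set.len, hr]
  have hperm : (PySem.Set.inter kr.2 match_players).Perm
      ((PySem.Set.ofList match_players).filter (fun p => decide (p ∈ kr.2))) := by
    rw [List.perm_ext_iff_of_nodup (PySem.Set.nodup_inter kr.2 match_players hnd)
      (List.Nodup.filter _ (PySem.Set.nodup_ofList match_players))]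
    intro a
    simp [PySem.Set.mem_inter, List.mem_filter, PySem.Set.mem_ofList, and_comm]
  rw [hperm.length_eq, ← List.countP_eq_length_filter]

lemma pvGetD_table : ∀ kr ∈ TeamsTable, (PySem.Dict.ofList TeamsTable).getD kr.1 [] = kr.2 := by decide

lemma pvKeys_table : (PySem.Dict.ofList TeamsTable).keys = TeamsTable.map (fun kr => kr.1) := by decide

-- ===== VERDICT (by name: the statement is the Claim_ definition above) =====
set_option maxRecDepth 100000 in
theorem team_check_spec : Claim_equal_team_check := by
  intro match_players _
  show team_check match_players = team_check_alt match_players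
  rw [team_check, team_check_alt]
  rw [pvKeys_table, List.foldl_map, List.foldl_map]
  have hstep : ∀ (st : String × String), ∀ kr ∈ TeamsTable,
      (if PySem.Set.len (PySem.Set.inter
            (PySem.Set.ofList ((PySem.Dict.ofList TeamsTable).getD kr.1 [])) match_players) = 4 then
        (if st.1 = "None" then (kr.1, st.2) else (st.1, kr.1))
      else st)
      = (if (pvCounts match_players).getD kr.1 0 = 4 then
          (if st.1 = "None" then (kr.1, st.2) else (st.1, kr.1))
        else st) := by
    intro st kr hkr
    rw [pvGetD_table kr hkr]
    have hc : (PySem.Set.len (PySem.Set.inter (PySem.Set.ofList kr.2) match_players) = 4)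
        ↔ ((pvCounts match_players).getD kr.1 0 = 4) := by
      rw [pvInter_len match_players kr hkr, pvCounts_getD match_players kr hkr]
    exact if_congr hc rfl rfl
  rw [PySem.List.foldl_congr_mem TeamsTable _ _ _ hstep]
  rfl
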